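-- pv_equiv track=rewrite | github.com/pypi-data/pypi-mirror-60 | packages/SPerATo/SPerATo-0.9.1-py3-none-any.whl/sperato/cluster.py | parse_partitions
-- ===== SOURCE A (Python) =====
-- def parse_partitions(pre_partitions, each_partition, all_partitions):
--     proto_partitions = set()
--     partitions_iterable = []
--     multi_partition_report = False
--     if each_partition is True:
--         multi_partition_report = True
--     for partition in pre_partitions:
--         if partition == "all":
--             for part in all_partitions:
--                 proto_partitions.add(part)
--         elif partition in all_partitions:
--             proto_partitions.add(partition)
--     proto_partitions = list(proto_partitions)
--     proto_partitions.sort()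
--     partitions_iterable.append(proto_partitions)
--     if multi_partition_report:
--         for partition in proto_partitions:
--             partitions_iterable.append([partition])
--     return partitions_iterable
-- ===== SOURCE B (Python) =====
-- def parse_partitions(pre_partitions, each_partition, all_partitions):
--     wanted = set(pre_partitions)
--     take_all = "all" in wanted
--     proto = [p for p in sorted(set(all_partitions)) if take_all or p in wanted]
--     result = [proto]
--     if each_partition is True:
--         result += [[p] for p in proto]
--     return result
-- ===== Notes on version B (the rewrite author's own statement) =====
-- stated objective: faster
-- what changed: B inverts the traversal: instead of looping over pre_partitions, expanding 'all' and filtering each request against all_partitions and then sorting the collected set, B sorts the deduplicated universe once and keeps each universe element that is requested (or everything when 'all' is requested), so the output is sorted by construction and no result set is accumulated.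
import Mathlib
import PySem

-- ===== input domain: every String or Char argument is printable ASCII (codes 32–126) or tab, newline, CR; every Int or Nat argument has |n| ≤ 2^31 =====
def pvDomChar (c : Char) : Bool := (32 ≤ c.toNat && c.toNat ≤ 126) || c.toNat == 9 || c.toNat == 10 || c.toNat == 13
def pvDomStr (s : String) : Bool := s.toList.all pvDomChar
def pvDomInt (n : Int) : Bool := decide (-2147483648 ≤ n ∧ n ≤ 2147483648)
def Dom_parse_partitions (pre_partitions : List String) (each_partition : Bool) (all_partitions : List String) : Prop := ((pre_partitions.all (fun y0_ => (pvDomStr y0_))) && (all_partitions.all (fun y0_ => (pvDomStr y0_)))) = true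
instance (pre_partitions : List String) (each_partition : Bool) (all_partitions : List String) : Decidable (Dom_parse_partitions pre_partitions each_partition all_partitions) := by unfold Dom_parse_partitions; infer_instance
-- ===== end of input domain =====

-- B inverts the traversal: it filters the sorted deduplicated universe by a set of requests,
-- instead of A's loop over requests that expands "all"/filters against the universe and then sorts.

-- ===== PORT A =====
-- one iteration of A's 'for partition in pre_partitions' loop (the inner 'for part in all_partitions'
-- adding each element is PySem.Set.update)
def pvStepA (all_partitions : List String) (s : PySem.Set String) (p : String) : PySem.Set String :=
  if p == "all" then PySem.Set.update s all_partitions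
  else if all_partitions.contains p then PySem.Set.add s p
  else s

def parse_partitions (pre_partitions : List String) (each_partition : Bool) (all_partitions : List String) : List (List String) :=
  let multi_partition_report := each_partition
  let proto_set : PySem.Set String := pre_partitions.foldl (pvStepA all_partitions) PySem.Set.empty
  let proto_partitions := PySem.List.sorted proto_set (fun x => x) false
  let partitions_iterable := [proto_partitions]
  if multi_partition_report then
    partitions_iterable ++ proto_partitions.map (fun partition => [partition])
  else partitions_iterable

-- ===== PORT B =====
def parse_partitions_alt (pre_partitions : List String) (each_partition : Bool) (all_partitions : List String) : List (List String) :=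
  let wanted : PySem.Set String := PySem.Set.ofList pre_partitions
  let take_all := PySem.Set.contains wanted "all"
  let proto := (PySem.List.sorted (PySem.Set.ofList all_partitions) (fun x => x) false).filter
    (fun p => take_all || PySem.Set.contains wanted p)
  let result := [proto]
  if each_partition then result ++ proto.map (fun p => [p]) else result

-- ===== PRECONDITION & SPEC =====
def Spec_parse_partitions (pre_partitions : List String) (each_partition : Bool) (all_partitions : List String) (out : List (List String)) : Prop := out = parse_partitions_alt pre_partitions each_partition all_partitions
instance (pre_partitions : List String) (each_partition : Bool) (all_partitions : List String) (out : List (List String)) : Decidable (Spec_parse_partitions pre_partitions each_partition all_partitions out) := by unfold Spec_parse_partitions; infer_instance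

-- ===== CLAIM =====
def Claim_equal_parse_partitions : Prop := ∀ (pre_partitions : List String) (each_partition : Bool) (all_partitions : List String), Dom_parse_partitions pre_partitions each_partition all_partitions → Spec_parse_partitions pre_partitions each_partition all_partitions (parse_partitions pre_partitions each_partition all_partitions)

-- ===== LEMMAS AND PROOFS =====

theorem mem_foldl_stepA (all : List String) (x : String) :
    ∀ (pre : List String) (s : PySem.Set String),
      x ∈ pre.foldl (pvStepA all) s ↔ x ∈ s ∨ (x ∈ all ∧ ("all" ∈ pre ∨ x ∈ pre)) := by
  intro pre
  induction pre with
  | nil => intro s; simp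
  | cons p t ih =>
    intro s
    simp only [List.foldl_cons, ih, pvStepA]
    by_cases hp : p = "all"
    · subst hp
      simp [PySem.Set.mem_update]
      tauto
    · simp only [beq_iff_eq, hp, if_false]
      by_cases hm : p ∈ all
      · have hc : all.contains p = true := by simpa [List.contains_eq_mem]
        simp only [hc, if_true, PySem.Set.mem_add, List.mem_cons]
        constructor
        · rintro ((h | rfl) | ⟨hx, h⟩)
          · exact Or.inl h
          · exact Or.inr ⟨hm, Or.inr (Or.inl rfl)⟩
          · exact Or.inr ⟨hx, by tauto⟩
        · rintro (h | ⟨hx, (h | h) | (rfl | h)⟩)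
          · tauto
          · exact absurd h.symm hp
          · tauto
          · tauto
          · tauto
      · have hc : all.contains p = false := by simp [List.contains_eq_mem, hm]
        simp only [hc, Bool.false_eq_true, if_false, List.mem_cons]
        constructor
        · rintro (h | ⟨hx, h | h⟩) <;> tauto
        · rintro (h | ⟨hx, (h | h) | (rfl | h)⟩)
          · tauto
          · exact absurd h.symm hp
          · tauto
          · exact absurd hx hm
          · tauto

theorem nodup_foldl_stepA (all : List String) :
    ∀ (pre : List String) (s : PySem.Set String), s.Nodup → (pre.foldl (pvStepA all) s).Nodup := by
  intro pre
  induction pre with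
  | nil => intro s h; simpa using h
  | cons p t ih =>
    intro s h
    simp only [List.foldl_cons]
    apply ih
    unfold pvStepA
    split_ifs
    · exact PySem.Set.nodup_update _ _ h
    · exact PySem.Set.nodup_add _ _ h
    · exact h

theorem proto_eq (pre all : List String) :
    PySem.List.sorted (pre.foldl (pvStepA all) PySem.Set.empty) (fun x => x) false =
      (PySem.List.sorted (PySem.Set.ofList all) (fun x => x) false).filter
        (fun p => PySem.Set.contains (PySem.Set.ofList pre) "all"
                  || PySem.Set.contains (PySem.Set.ofList pre) p) := by
  apply PySem.List.sorted_eq_of_perm_of_pairwise_lt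
  · -- permutation: same elements, both nodup
    have hnodupA : (pre.foldl (pvStepA all) PySem.Set.empty).Nodup :=
      nodup_foldl_stepA all pre _ (by simp [PySem.Set.empty])
    have hnodupS : (PySem.List.sorted (PySem.Set.ofList all) (fun x => x) false).Nodup :=
      ((PySem.List.sorted_perm _ _ _).nodup_iff).mpr (PySem.Set.nodup_ofList all)
    rw [List.perm_comm, List.perm_ext_iff_of_nodup hnodupA (hnodupS.filter _)]
    intro x
    rw [List.mem_filter, PySem.List.mem_sorted, PySem.Set.mem_ofList, mem_foldl_stepA]
    simp [PySem.Set.contains, PySem.Set.mem_ofList, PySem.Set.empty, List.contains_eq_mem]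
  · exact (PySem.List.sorted_ofList_pairwise_lt all).filter _

-- ===== VERDICT =====
theorem parse_partitions_spec : Claim_equal_parse_partitions := by
  intro pre each all _
  unfold Spec_parse_partitions parse_partitions parse_partitions_alt
  simp only []
  rw [proto_eq]
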